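-- pv_equiv track=rewrite | github.com/yyexela/T-SHRED | src/helpers.py | sindy_library_terms
-- ===== SOURCE A (Python) =====
-- def sindy_library_terms(latent_dim, poly_order, include_sine=False):
--     # Ones - constant term
--     library = ["1"]
--
--     # Add polynomials up to poly_order
--     for i in range(latent_dim):
--         library.append(f"z{i}")
--
--     if poly_order > 1:
--         for i in range(latent_dim):
--             for j in range(i,latent_dim):
--                 library.append(f"z{i} * z{j}") # Use element-wise multiplication
--
--     if poly_order > 2:
--         for i in range(latent_dim):
--             for j in range(i,latent_dim):
--                 for k in range(j,latent_dim):
--                     library.append(f"z{i} * z{j} * z{k}")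
--
--     if poly_order > 3:
--         for i in range(latent_dim):
--             for j in range(i,latent_dim):
--                 for k in range(j,latent_dim):
--                     for p in range(k,latent_dim):
--                         library.append(f"z{i} * z{j} * z{k} * z{p}")
--
--     if poly_order > 4:
--         for i in range(latent_dim):
--             for j in range(i,latent_dim):
--                 for k in range(j,latent_dim):
--                     for p in range(k,latent_dim):
--                         for q in range(p,latent_dim):
--                             library.append(f"z{i} * z{j} * z{k} * z{p} * z{q}")
--
--     # Add sine terms if requested
--     if include_sine:
--         for i in range(latent_dim):
--             library.append(f"sin(z{i})")
--
--     return library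
-- ===== SOURCE B (Python) =====
-- def sindy_library_terms(latent_dim, poly_order, include_sine=False):
--     # One parameterized degree loop over nondecreasing index combinations
--     # replaces A's five unrolled nested-loop blocks.
--     def combos(start, d):
--         if d == 0:
--             yield []
--         else:
--             for i in range(start, latent_dim):
--                 for rest in combos(i, d - 1):
--                     yield [i] + rest
--
--     library = ["1"]
--     for d in range(1, max(1, min(poly_order, 5)) + 1):
--         for combo in combos(0, d):
--             library.append(" * ".join(f"z{i}" for i in combo))
--     if include_sine:
--         for i in range(latent_dim):
--             library.append(f"sin(z{i})")
--     return library
-- ===== Notes on version B (the rewrite author's own statement) =====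
-- stated objective: simpler
-- what changed: A's five unrolled nested-loop blocks (one hand-written block per polynomial degree 2..5) are replaced by a single degree loop 1..max(1,min(poly_order,5)) over recursively generated nondecreasing index combinations, joined with ' * '.
import Mathlib
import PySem

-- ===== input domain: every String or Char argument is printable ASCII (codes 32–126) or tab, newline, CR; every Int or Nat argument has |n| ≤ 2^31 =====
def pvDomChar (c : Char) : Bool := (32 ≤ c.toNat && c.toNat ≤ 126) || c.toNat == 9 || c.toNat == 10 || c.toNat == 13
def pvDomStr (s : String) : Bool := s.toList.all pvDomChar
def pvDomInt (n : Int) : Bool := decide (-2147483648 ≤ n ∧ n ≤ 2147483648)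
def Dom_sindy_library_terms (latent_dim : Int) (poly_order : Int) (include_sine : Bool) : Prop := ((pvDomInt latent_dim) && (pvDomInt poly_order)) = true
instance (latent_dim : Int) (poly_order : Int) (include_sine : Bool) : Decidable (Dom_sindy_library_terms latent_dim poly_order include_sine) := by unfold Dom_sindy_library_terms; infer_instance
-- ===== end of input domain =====

-- B replaces A's five unrolled nested-loop blocks by one degree loop over
-- recursively generated nondecreasing index combinations (simpler decomposition).

-- ===== PORT A =====
def sindy_library_terms (latent_dim : Int) (poly_order : Int) (include_sine : Bool) : List String :=
  let library : List String := ["1"]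
  let library := (PySem.List.pyRange 0 latent_dim 1).foldl
    (fun acc i => acc ++ ["z" ++ PySem.Int.toStr i]) library
  let library := if poly_order > 1 then
      (PySem.List.pyRange 0 latent_dim 1).foldl (fun acc i =>
        (PySem.List.pyRange i latent_dim 1).foldl (fun acc j =>
          acc ++ ["z" ++ PySem.Int.toStr i ++ " * z" ++ PySem.Int.toStr j]) acc) library
    else library
  let library := if poly_order > 2 then
      (PySem.List.pyRange 0 latent_dim 1).foldl (fun acc i =>
        (PySem.List.pyRange i latent_dim 1).foldl (fun acc j =>
          (PySem.List.pyRange j latent_dim 1).foldl (fun acc k =>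
            acc ++ ["z" ++ PySem.Int.toStr i ++ " * z" ++ PySem.Int.toStr j ++ " * z" ++ PySem.Int.toStr k]) acc) acc) library
    else library
  let library := if poly_order > 3 then
      (PySem.List.pyRange 0 latent_dim 1).foldl (fun acc i =>
        (PySem.List.pyRange i latent_dim 1).foldl (fun acc j =>
          (PySem.List.pyRange j latent_dim 1).foldl (fun acc k =>
            (PySem.List.pyRange k latent_dim 1).foldl (fun acc p =>
              acc ++ ["z" ++ PySem.Int.toStr i ++ " * z" ++ PySem.Int.toStr j ++ " * z" ++ PySem.Int.toStr k ++ " * z" ++ PySem.Int.toStr p]) acc) acc) acc) library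
    else library
  let library := if poly_order > 4 then
      (PySem.List.pyRange 0 latent_dim 1).foldl (fun acc i =>
        (PySem.List.pyRange i latent_dim 1).foldl (fun acc j =>
          (PySem.List.pyRange j latent_dim 1).foldl (fun acc k =>
            (PySem.List.pyRange k latent_dim 1).foldl (fun acc p =>
              (PySem.List.pyRange p latent_dim 1).foldl (fun acc q =>
                acc ++ ["z" ++ PySem.Int.toStr i ++ " * z" ++ PySem.Int.toStr j ++ " * z" ++ PySem.Int.toStr k ++ " * z" ++ PySem.Int.toStr p ++ " * z" ++ PySem.Int.toStr q]) acc) acc) acc) acc) library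
    else library
  let library := if include_sine then
      (PySem.List.pyRange 0 latent_dim 1).foldl
        (fun acc i => acc ++ ["sin(z" ++ PySem.Int.toStr i ++ ")"]) library
    else library
  library

-- ===== PORT B =====
-- combos(start, d): nondecreasing index tuples of length d with entries in [start, latent_dim), lexicographic
def pvCombos (n : Int) : Int → Nat → List (List Int)
  | _, 0 => [[]]
  | start, d + 1 => (PySem.List.pyRange start n 1).flatMap (fun i => (pvCombos n i d).map (i :: ·))

-- " * ".join(f"z{i}" for i in combo)
def pvTerm (c : List Int) : String := PySem.Str.join " * " (c.map (fun i => "z" ++ PySem.Int.toStr i))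

def sindy_library_terms_alt (latent_dim : Int) (poly_order : Int) (include_sine : Bool) : List String :=
  let maxd := max 1 (min poly_order 5)
  ["1"]
  ++ (PySem.List.pyRange 1 (maxd + 1) 1).flatMap
      (fun d => (pvCombos latent_dim 0 d.toNat).map pvTerm)
  ++ (if include_sine then
        (PySem.List.pyRange 0 latent_dim 1).map (fun i => "sin(z" ++ PySem.Int.toStr i ++ ")")
      else [])

-- ===== PRECONDITION & SPEC =====
def Spec_sindy_library_terms (latent_dim : Int) (poly_order : Int) (include_sine : Bool) (out : List String) : Prop := out = sindy_library_terms_alt latent_dim poly_order include_sine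
instance (latent_dim : Int) (poly_order : Int) (include_sine : Bool) (out : List String) : Decidable (Spec_sindy_library_terms latent_dim poly_order include_sine out) := by unfold Spec_sindy_library_terms; infer_instance

-- ===== CLAIM (what is proved, stated in full; the proofs are below) =====
def Claim_equal_sindy_library_terms : Prop := ∀ (latent_dim : Int) (poly_order : Int) (include_sine : Bool), Dom_sindy_library_terms latent_dim poly_order include_sine → Spec_sindy_library_terms latent_dim poly_order include_sine (sindy_library_terms latent_dim poly_order include_sine)

-- ===== LEMMAS AND PROOFS =====

lemma pvTerm_one (i : Int) : pvTerm [i] = "z" ++ PySem.Int.toStr i := by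
  apply String.toList_inj.mp
  simp [pvTerm, PySem.Str.join, PySem.Chars.join_singleton]

lemma pvTerm_cons (i j : Int) (c : List Int) :
    pvTerm (i :: j :: c) = "z" ++ PySem.Int.toStr i ++ " * " ++ pvTerm (j :: c) := by
  apply String.toList_inj.mp
  simp [pvTerm, PySem.Str.join, PySem.Chars.join_cons_cons]

lemma pvTerm_two (i j : Int) :
    pvTerm [i, j] = "z" ++ PySem.Int.toStr i ++ " * z" ++ PySem.Int.toStr j := by
  apply String.toList_inj.mp
  simp [pvTerm_cons, pvTerm_one]

lemma pvTerm_three (i j k : Int) :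
    pvTerm [i, j, k] = "z" ++ PySem.Int.toStr i ++ " * z" ++ PySem.Int.toStr j ++ " * z" ++ PySem.Int.toStr k := by
  apply String.toList_inj.mp
  simp [pvTerm_cons, pvTerm_one]

lemma pvTerm_four (i j k p : Int) :
    pvTerm [i, j, k, p] = "z" ++ PySem.Int.toStr i ++ " * z" ++ PySem.Int.toStr j ++ " * z" ++ PySem.Int.toStr k ++ " * z" ++ PySem.Int.toStr p := by
  apply String.toList_inj.mp
  simp [pvTerm_cons, pvTerm_one]

lemma pvTerm_five (i j k p q : Int) :
    pvTerm [i, j, k, p, q] = "z" ++ PySem.Int.toStr i ++ " * z" ++ PySem.Int.toStr j ++ " * z" ++ PySem.Int.toStr k ++ " * z" ++ PySem.Int.toStr p ++ " * z" ++ PySem.Int.toStr q := by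
  apply String.toList_inj.mp
  simp [pvTerm_cons, pvTerm_one]

lemma pvCombos_map_one (n : Int) :
    (pvCombos n 0 1).map pvTerm
      = (PySem.List.pyRange 0 n 1).map (fun i => "z" ++ PySem.Int.toStr i) := by
  simp [pvCombos, pvTerm_one, ← List.map_eq_flatMap]

lemma pvCombos_map_two (n : Int) :
    (pvCombos n 0 2).map pvTerm
      = (PySem.List.pyRange 0 n 1).flatMap (fun i =>
          (PySem.List.pyRange i n 1).map (fun j =>
            "z" ++ PySem.Int.toStr i ++ " * z" ++ PySem.Int.toStr j)) := by
  simp [pvCombos, List.map_flatMap, pvTerm_two]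
  simp [← List.map_eq_flatMap]

lemma pvCombos_map_three (n : Int) :
    (pvCombos n 0 3).map pvTerm
      = (PySem.List.pyRange 0 n 1).flatMap (fun i =>
          (PySem.List.pyRange i n 1).flatMap (fun j =>
            (PySem.List.pyRange j n 1).map (fun k =>
              "z" ++ PySem.Int.toStr i ++ " * z" ++ PySem.Int.toStr j ++ " * z" ++ PySem.Int.toStr k))) := by
  simp [pvCombos, List.map_flatMap, pvTerm_three]
  simp [← List.map_eq_flatMap]

lemma pvCombos_map_four (n : Int) :
    (pvCombos n 0 4).map pvTerm
      = (PySem.List.pyRange 0 n 1).flatMap (fun i =>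
          (PySem.List.pyRange i n 1).flatMap (fun j =>
            (PySem.List.pyRange j n 1).flatMap (fun k =>
              (PySem.List.pyRange k n 1).map (fun p =>
                "z" ++ PySem.Int.toStr i ++ " * z" ++ PySem.Int.toStr j ++ " * z" ++ PySem.Int.toStr k ++ " * z" ++ PySem.Int.toStr p)))) := by
  simp [pvCombos, List.map_flatMap, pvTerm_four]
  simp [← List.map_eq_flatMap]

lemma pvCombos_map_five (n : Int) :
    (pvCombos n 0 5).map pvTerm
      = (PySem.List.pyRange 0 n 1).flatMap (fun i =>
          (PySem.List.pyRange i n 1).flatMap (fun j =>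
            (PySem.List.pyRange j n 1).flatMap (fun k =>
              (PySem.List.pyRange k n 1).flatMap (fun p =>
                (PySem.List.pyRange p n 1).map (fun q =>
                  "z" ++ PySem.Int.toStr i ++ " * z" ++ PySem.Int.toStr j ++ " * z" ++ PySem.Int.toStr k ++ " * z" ++ PySem.Int.toStr p ++ " * z" ++ PySem.Int.toStr q))))) := by
  simp [pvCombos, List.map_flatMap, pvTerm_five]
  simp [← List.map_eq_flatMap]

lemma pv_main (latent_dim poly_order : Int) (include_sine : Bool) :
    sindy_library_terms latent_dim poly_order include_sine
      = sindy_library_terms_alt latent_dim poly_order include_sine := by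
  unfold sindy_library_terms sindy_library_terms_alt
  simp only [PySem.List.foldl_append_singleton_eq_map, PySem.List.foldl_append_eq_flatMap]
  rcases lt_or_ge poly_order 2 with h1 | h1
  · have hmax : max 1 (min poly_order 5) = 1 := by omega
    rw [hmax]
    have hr : PySem.List.pyRange 1 (1 + 1) 1 = [1] := by decide
    rw [hr]
    have h2 : ¬ poly_order > 1 := by omega
    have h3 : ¬ poly_order > 2 := by omega
    have h4 : ¬ poly_order > 3 := by omega
    have h5 : ¬ poly_order > 4 := by omega
    cases include_sine <;>
      simp [h2, h3, h4, h5, pvCombos_map_one]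
  · rcases lt_or_ge poly_order 3 with hsub | h2
    · have hmax : max 1 (min poly_order 5) = 2 := by omega
      rw [hmax]
      have hr : PySem.List.pyRange 1 (2 + 1) 1 = [1, 2] := by decide
      rw [hr]
      have g2 : poly_order > 1 := by omega
      have h3 : ¬ poly_order > 2 := by omega
      have h4 : ¬ poly_order > 3 := by omega
      have h5 : ¬ poly_order > 4 := by omega
      cases include_sine <;>
        simp [g2, h3, h4, h5, pvCombos_map_one, pvCombos_map_two, List.append_assoc]
    · rcases lt_or_ge poly_order 4 with hsub | h3
      · have hmax : max 1 (min poly_order 5) = 3 := by omega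
        rw [hmax]
        have hr : PySem.List.pyRange 1 (3 + 1) 1 = [1, 2, 3] := by decide
        rw [hr]
        have g2 : poly_order > 1 := by omega
        have g3 : poly_order > 2 := by omega
        have h4 : ¬ poly_order > 3 := by omega
        have h5 : ¬ poly_order > 4 := by omega
        cases include_sine <;>
          simp [g2, g3, h4, h5, pvCombos_map_one, pvCombos_map_two, pvCombos_map_three, List.append_assoc]
      · rcases lt_or_ge poly_order 5 with hsub | h4
        · have hmax : max 1 (min poly_order 5) = 4 := by omega
          rw [hmax]
          have hr : PySem.List.pyRange 1 (4 + 1) 1 = [1, 2, 3, 4] := by decide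
          rw [hr]
          have g2 : poly_order > 1 := by omega
          have g3 : poly_order > 2 := by omega
          have g4 : poly_order > 3 := by omega
          have h5 : ¬ poly_order > 4 := by omega
          cases include_sine <;>
            simp [g2, g3, g4, h5, pvCombos_map_one, pvCombos_map_two, pvCombos_map_three, pvCombos_map_four, List.append_assoc]
        · have hmax : max 1 (min poly_order 5) = 5 := by omega
          rw [hmax]
          have hr : PySem.List.pyRange 1 (5 + 1) 1 = [1, 2, 3, 4, 5] := by decide
          rw [hr]
          have g2 : poly_order > 1 := by omega
          have g3 : poly_order > 2 := by omega
          have g4 : poly_order > 3 := by omega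
          have g5 : poly_order > 4 := by omega
          cases include_sine <;>
            simp [g2, g3, g4, g5, pvCombos_map_one, pvCombos_map_two, pvCombos_map_three, pvCombos_map_four, pvCombos_map_five, List.append_assoc]

-- ===== VERDICT (by name: the statement is the Claim_ definition above) =====
theorem sindy_library_terms_spec : Claim_equal_sindy_library_terms := by
  intro latent_dim poly_order include_sine _
  exact pv_main latent_dim poly_order include_sine
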